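-- pv_equiv track=rewrite | github.com/MrBrantCode/unitest_baseline | mut_generate/mist_train_cf/cf_90130/solution.py | findSmallestOddPrimeIndex
-- ===== SOURCE A (Python) =====
-- import math
--
-- def findSmallestOddPrimeIndex(arr):
--     def isOddPrime(num):
--         if num == 2:
--             return True
--         if num < 2 or num % 2 == 0:
--             return False
--         for i in range(3, int(math.sqrt(num))+1, 2):
--             if num % i == 0:
--                 return False
--         return True
--
--     smallestOddPrimeIndex = -1
--     for i in range(len(arr)):
--         if isOddPrime(arr[i]):
--             if smallestOddPrimeIndex == -1:
--                 smallestOddPrimeIndex = i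
--             else:
--                 if arr[i] < arr[smallestOddPrimeIndex]:
--                     smallestOddPrimeIndex = i
--     return smallestOddPrimeIndex
-- ===== SOURCE B (Python) =====
-- import math
--
-- def findSmallestOddPrimeIndex(arr):
--     # sort-then-scan: order the indices by (value, index), then return the
--     # first index in that order whose value is prime; primality is only
--     # tested until the first prime is found.
--     def isOddPrime(num):
--         if num == 2:
--             return True
--         if num < 2 or num % 2 == 0:
--             return False
--         for i in range(3, int(math.sqrt(num))+1, 2):
--             if num % i == 0:
--                 return False
--         return True
--
--     order = sorted(range(len(arr)), key=lambda i: (arr[i], i))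
--     for i in order:
--         if isOddPrime(arr[i]):
--             return i
--     return -1
-- ===== Notes on version B (the rewrite author's own statement) =====
-- stated objective: alternative
-- what changed: Replaces A's single fused pass that trial-tests every element for primality while tracking the best index with a sort-then-scan algorithm: sort the indices by (value, index) and return the first index in that order whose value is prime, stopping the primality testing at the first hit.
import Mathlib
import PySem

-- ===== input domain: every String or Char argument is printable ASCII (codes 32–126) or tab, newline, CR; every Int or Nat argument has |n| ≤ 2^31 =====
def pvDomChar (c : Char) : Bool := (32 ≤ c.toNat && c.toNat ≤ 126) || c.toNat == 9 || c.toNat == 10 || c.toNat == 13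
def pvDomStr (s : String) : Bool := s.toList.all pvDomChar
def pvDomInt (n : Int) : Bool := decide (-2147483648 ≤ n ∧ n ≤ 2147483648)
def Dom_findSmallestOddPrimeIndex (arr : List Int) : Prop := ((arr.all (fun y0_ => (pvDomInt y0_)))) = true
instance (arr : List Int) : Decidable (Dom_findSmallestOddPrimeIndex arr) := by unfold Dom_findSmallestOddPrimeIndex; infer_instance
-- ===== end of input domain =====

-- B replaces A's fused min-tracking pass (primality-testing every element) by sort-then-scan:
-- sort the indices by (value, index), return the first prime in that order; objective: alternative.

-- ===== PORT A =====
-- shared helper: B's Python contains the identical trial-division helper, so both ports call this.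
-- int(math.sqrt(num)) is ported as Nat.sqrt: exact for 0 ≤ num ≤ 2^31 (the double rounding of
-- math.sqrt cannot cross an integer below 2^52), which is the whole stated domain Dom_.
def isOddPrime (num : Int) : Bool :=
  if num == 2 then true
  else if num < 2 || PySem.Int.mod num 2 == 0 then false
  else if (PySem.List.pyRange 3 ((Nat.sqrt num.toNat : Int) + 1) 2).any
            (fun i => PySem.Int.mod num i == 0) then false
  else true

def findSmallestOddPrimeIndex (arr : List Int) : Int :=
  (PySem.List.pyRange 0 arr.length 1).foldl
    (fun smallest i =>
      if isOddPrime (PySem.List.pyGetD arr i 0) then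
        if smallest == -1 then i
        else if PySem.List.pyGetD arr i 0 < PySem.List.pyGetD arr smallest 0 then i
        else smallest
      else smallest)
    (-1)

-- ===== PORT B =====
def findSmallestOddPrimeIndex_alt (arr : List Int) : Int :=
  let order := PySem.List.sorted2 (PySem.List.pyRange 0 arr.length 1)
      (fun i => PySem.List.pyGetD arr i 0) (fun i => i) false
  match order.find? (fun i => isOddPrime (PySem.List.pyGetD arr i 0)) with
  | some i => i
  | none => -1

-- ===== PRECONDITION & SPEC =====
def Spec_findSmallestOddPrimeIndex (arr : List Int) (out : Int) : Prop := out = findSmallestOddPrimeIndex_alt arr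
instance (arr : List Int) (out : Int) : Decidable (Spec_findSmallestOddPrimeIndex arr out) := by unfold Spec_findSmallestOddPrimeIndex; infer_instance

-- ===== CLAIM (what is proved, stated in full; the proofs are below) =====
def Claim_equal_findSmallestOddPrimeIndex : Prop := ∀ (arr : List Int), Dom_findSmallestOddPrimeIndex arr → Spec_findSmallestOddPrimeIndex arr (findSmallestOddPrimeIndex arr)

-- ===== LEMMAS AND PROOFS =====

-- proof-only abbreviations
def pvP (arr : List Int) (i : Int) : Bool := isOddPrime (PySem.List.pyGetD arr i 0)

-- the lexicographic "is at least as good a candidate" order on indices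
def pvR (arr : List Int) (i j : Int) : Prop :=
  PySem.List.pyGetD arr i 0 < PySem.List.pyGetD arr j 0 ∨
  (PySem.List.pyGetD arr i 0 = PySem.List.pyGetD arr j 0 ∧ i ≤ j)

theorem pvR_refl (arr : List Int) (i : Int) : pvR arr i i := Or.inr ⟨rfl, le_refl i⟩

theorem pvR_trans (arr : List Int) {i j k : Int} (h1 : pvR arr i j) (h2 : pvR arr j k) :
    pvR arr i k := by
  unfold pvR at *; omega

theorem pvR_antisymm (arr : List Int) {i j : Int} (h1 : pvR arr i j) (h2 : pvR arr j i) :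
    i = j := by
  unfold pvR at *; omega

-- A's loop as an Option fold
def pvOptFold (arr : List Int) (l : List Int) (acc : Option Int) : Option Int :=
  l.foldl
    (fun acc i =>
      if pvP arr i then
        match acc with
        | none => some i
        | some m => if PySem.List.pyGetD arr i 0 < PySem.List.pyGetD arr m 0 then some i else some m
      else acc) acc

-- A's loop with a live (nonnegative) best index runs lockstep with the Option fold from `some s`.
theorem pvFold_some (arr : List Int) (l : List Int) (hl : ∀ i ∈ l, 0 ≤ i)
    (s : Int) (hs : 0 ≤ s) :
    l.foldl
      (fun smallest i =>
        if isOddPrime (PySem.List.pyGetD arr i 0) then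
          if smallest == -1 then i
          else if PySem.List.pyGetD arr i 0 < PySem.List.pyGetD arr smallest 0 then i
          else smallest
        else smallest) s
    = (pvOptFold arr l (some s)).getD (-1) := by
  induction l generalizing s with
  | nil => simp [pvOptFold]
  | cons i t ih =>
    have hi : (0:Int) ≤ i := hl i (by simp)
    have ht : ∀ j ∈ t, (0:Int) ≤ j := fun j hj => hl j (by simp [hj])
    have hne : ¬ (s = -1) := by omega
    by_cases hp : isOddPrime (PySem.List.pyGetD arr i 0)
    · by_cases hlt : PySem.List.pyGetD arr i 0 < PySem.List.pyGetD arr s 0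
      · simpa [pvOptFold, pvP, hp, hne, hlt] using ih ht i hi
      · simpa [pvOptFold, pvP, hp, hne, hlt] using ih ht s hs
    · simpa [pvOptFold, pvP, hp] using ih ht s hs

-- from the sentinel start -1 versus the Option fold's `none` start.
theorem pvFold_none (arr : List Int) (l : List Int) (hl : ∀ i ∈ l, 0 ≤ i) :
    l.foldl
      (fun smallest i =>
        if isOddPrime (PySem.List.pyGetD arr i 0) then
          if smallest == -1 then i
          else if PySem.List.pyGetD arr i 0 < PySem.List.pyGetD arr smallest 0 then i
          else smallest
        else smallest) (-1)
    = (pvOptFold arr l none).getD (-1) := by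
  induction l with
  | nil => simp [pvOptFold]
  | cons i t ih =>
    have hi : (0:Int) ≤ i := hl i (by simp)
    have ht : ∀ j ∈ t, (0:Int) ≤ j := fun j hj => hl j (by simp [hj])
    by_cases hp : isOddPrime (PySem.List.pyGetD arr i 0)
    · simpa [pvOptFold, pvP, hp] using pvFold_some arr t ht i hi
    · simpa [pvOptFold, pvP, hp] using ih ht

-- the Option fold from a live prime candidate m computes the pvR-least prime index
theorem pvOpt_some (arr : List Int) (l : List Int) (hl : l.Pairwise (· < ·))
    (m : Int) (hm : ∀ i ∈ l, m < i) (hPm : pvP arr m = true) :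
    ∃ j, pvOptFold arr l (some m) = some j ∧ pvP arr j = true ∧ pvR arr j m ∧
      (j = m ∨ j ∈ l) ∧ ∀ i ∈ l, pvP arr i = true → pvR arr j i := by
  induction l generalizing m with
  | nil => exact ⟨m, rfl, hPm, pvR_refl arr m, Or.inl rfl, by simp⟩
  | cons i t ih =>
    rw [List.pairwise_cons] at hl
    have hmi : m < i := hm i (by simp)
    have hmt : ∀ j ∈ t, m < j := fun j hj => lt_trans hmi (hl.1 j hj)
    by_cases hp : pvP arr i = true
    · by_cases hlt : PySem.List.pyGetD arr i 0 < PySem.List.pyGetD arr m 0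
      · obtain ⟨j, hfold, hPj, hRji, hmem, hall⟩ := ih hl.2 i hl.1 hp
        refine ⟨j, ?_, hPj, ?_, ?_, ?_⟩
        · simpa [pvOptFold, hp, hlt] using hfold
        · unfold pvR at hRji ⊢; omega
        · rcases hmem with h | h
          · exact Or.inr (by simp [h])
          · exact Or.inr (by simp [h])
        · intro x hx hPx
          rcases List.mem_cons.1 hx with rfl | hx
          · exact hRji
          · exact hall x hx hPx
      · obtain ⟨j, hfold, hPj, hRjm, hmem, hall⟩ := ih hl.2 m hmt hPm
        refine ⟨j, ?_, hPj, hRjm, ?_, ?_⟩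
        · simpa [pvOptFold, hp, hlt] using hfold
        · rcases hmem with h | h
          · exact Or.inl h
          · exact Or.inr (by simp [h])
        · intro x hx hPx
          rcases List.mem_cons.1 hx with rfl | hx
          · unfold pvR at hRjm ⊢; omega
          · exact hall x hx hPx
    · obtain ⟨j, hfold, hPj, hRjm, hmem, hall⟩ := ih hl.2 m hmt hPm
      refine ⟨j, ?_, hPj, hRjm, ?_, ?_⟩
      · simpa [pvOptFold, hp] using hfold
      · rcases hmem with h | h
        · exact Or.inl h
        · exact Or.inr (by simp [h])
      · intro x hx hPx
        rcases List.mem_cons.1 hx with rfl | hx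
        · simp [hPx] at hp
        · exact hall x hx hPx

theorem pvOpt_none (arr : List Int) (l : List Int) (hl : l.Pairwise (· < ·)) :
    (pvOptFold arr l none = none ∧ ∀ i ∈ l, pvP arr i = false) ∨
    ∃ j, pvOptFold arr l none = some j ∧ pvP arr j = true ∧ j ∈ l ∧
      ∀ i ∈ l, pvP arr i = true → pvR arr j i := by
  induction l with
  | nil => exact Or.inl ⟨rfl, by simp⟩
  | cons i t ih =>
    rw [List.pairwise_cons] at hl
    by_cases hp : pvP arr i = true
    · obtain ⟨j, hfold, hPj, hRji, hmem, hall⟩ := pvOpt_some arr t hl.2 i hl.1 hp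
      refine Or.inr ⟨j, ?_, hPj, ?_, ?_⟩
      · simpa [pvOptFold, hp] using hfold
      · rcases hmem with h | h
        · simp [h]
        · simp [h]
      · intro x hx hPx
        rcases List.mem_cons.1 hx with rfl | hx
        · exact hRji
        · exact hall x hx hPx
    · rcases ih hl.2 with ⟨hnone, hall⟩ | ⟨j, hfold, hPj, hmem, hall⟩
      · refine Or.inl ⟨?_, ?_⟩
        · simpa [pvOptFold, hp] using hnone
        · intro x hx
          rcases List.mem_cons.1 hx with rfl | hx
          · simpa using hp
          · exact hall x hx
      · refine Or.inr ⟨j, ?_, hPj, by simp [hmem], ?_⟩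
        · simpa [pvOptFold, hp] using hfold
        · intro x hx hPx
          rcases List.mem_cons.1 hx with rfl | hx
          · simp [hPx] at hp
          · exact hall x hx hPx

-- find? on a pvR-sorted list returns a pvR-least prime index
theorem pvFind_some_min (arr : List Int) (s : List Int) (hs : s.Pairwise (pvR arr))
    (j : Int) (h : s.find? (pvP arr) = some j) :
    ∀ i ∈ s, pvP arr i = true → pvR arr j i := by
  induction s with
  | nil => simp at h
  | cons x t ih =>
    rw [List.pairwise_cons] at hs
    by_cases hp : pvP arr x = true
    · rw [List.find?_cons_of_pos hp] at h
      obtain rfl : x = j := by simpa using h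
      intro i hi hPi
      rcases List.mem_cons.1 hi with rfl | hi
      · exact pvR_refl arr i
      · exact hs.1 i hi
    · rw [List.find?_cons_of_neg hp] at h
      intro i hi hPi
      rcases List.mem_cons.1 hi with rfl | hi
      · exact absurd hPi hp
      · exact ih hs.2 h i hi hPi

-- the comparison function sorted2 sorts with (value first, index to break ties)
def pvBefore (arr : List Int) (a b : Int) : Bool :=
  decide (PySem.List.pyGetD arr a 0 < PySem.List.pyGetD arr b 0) ||
  (!decide (PySem.List.pyGetD arr b 0 < PySem.List.pyGetD arr a 0) && decide (a < b))

theorem pvBefore_true (arr : List Int) {a b : Int} (h : pvBefore arr a b = true) :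
    pvR arr a b := by
  simp [pvBefore] at h; unfold pvR; omega

theorem pvBefore_false (arr : List Int) {a b : Int} (h : pvBefore arr a b = false) :
    pvR arr b a := by
  simp [pvBefore] at h; unfold pvR; omega

theorem pvPairwise_insertBy (arr : List Int) (x : Int) (l : List Int)
    (hl : l.Pairwise (pvR arr)) :
    (PySem.List.insertBy (pvBefore arr) x l).Pairwise (pvR arr) := by
  induction l with
  | nil => simp [PySem.List.insertBy]
  | cons y ys ih =>
    rw [List.pairwise_cons] at hl
    by_cases hb : pvBefore arr x y = true
    · rw [show PySem.List.insertBy (pvBefore arr) x (y :: ys) = x :: y :: ys by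
        simp [PySem.List.insertBy, hb]]
      refine List.pairwise_cons.2 ⟨?_, List.pairwise_cons.2 hl⟩
      intro z hz
      rcases List.mem_cons.1 hz with rfl | hz
      · exact pvBefore_true arr hb
      · exact pvR_trans arr (pvBefore_true arr hb) (hl.1 z hz)
    · rw [show PySem.List.insertBy (pvBefore arr) x (y :: ys)
            = y :: PySem.List.insertBy (pvBefore arr) x ys by
        simp [PySem.List.insertBy, hb]]
      refine List.pairwise_cons.2 ⟨?_, ih hl.2⟩
      intro z hz
      rcases (PySem.List.mem_insertBy _ _ _ _).1 hz with rfl | hz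
      · exact pvBefore_false arr (by simpa using hb)
      · exact hl.1 z hz

theorem pvPairwise_foldl (arr : List Int) (l : List Int) (acc : List Int)
    (hacc : acc.Pairwise (pvR arr)) :
    (l.foldl (fun acc x => PySem.List.insertBy (pvBefore arr) x acc) acc).Pairwise (pvR arr) := by
  induction l generalizing acc with
  | nil => simpa
  | cons x t ih => exact ih _ (pvPairwise_insertBy arr x acc hacc)

-- ===== VERDICT (by name: the statement is the Claim_ definition above) =====
theorem findSmallestOddPrimeIndex_spec : Claim_equal_findSmallestOddPrimeIndex := by
  intro arr _
  show findSmallestOddPrimeIndex arr = findSmallestOddPrimeIndex_alt arr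
  have hnn : ∀ i ∈ PySem.List.pyRange 0 (arr.length : Int) 1, (0:Int) ≤ i :=
    fun i hi => ((PySem.List.mem_pyRange_one).1 hi).1
  have hlp : (PySem.List.pyRange 0 (arr.length : Int) 1).Pairwise (· < ·) :=
    PySem.List.pairwise_lt_pyRange_one 0 (arr.length : Int)
  -- name the two sides
  set idxs := PySem.List.pyRange 0 (arr.length : Int) 1 with hidxs
  have hA : findSmallestOddPrimeIndex arr = (pvOptFold arr idxs none).getD (-1) := by
    simpa [findSmallestOddPrimeIndex] using pvFold_none arr idxs hnn
  set s := PySem.List.sorted2 idxs (fun i => PySem.List.pyGetD arr i 0) (fun i => i) false with hsdef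
  have hperm : s.Perm idxs := PySem.List.sorted2_perm idxs _ _ false
  have hsp : s.Pairwise (pvR arr) := by
    have : s = idxs.foldl (fun acc x => PySem.List.insertBy (pvBefore arr) x acc) [] := rfl
    rw [this]
    exact pvPairwise_foldl arr idxs [] (by simp)
  have hB : findSmallestOddPrimeIndex_alt arr
      = match s.find? (fun i => isOddPrime (PySem.List.pyGetD arr i 0)) with
        | some i => i
        | none => -1 := rfl
  rw [hA, hB]
  rcases pvOpt_none arr idxs hlp with ⟨hnone, hall⟩ | ⟨j1, hfold, hP1, hmem1, hall1⟩
  · have hfnone : s.find? (fun i => isOddPrime (PySem.List.pyGetD arr i 0)) = none := by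
      rw [List.find?_eq_none]
      intro x hx
      have := hall x (hperm.mem_iff.1 hx)
      simpa [pvP] using this
    simp [hnone, hfnone]
  · cases hfind : s.find? (fun i => isOddPrime (PySem.List.pyGetD arr i 0)) with
    | none =>
      exfalso
      have hx := (List.find?_eq_none.1 hfind) j1 (hperm.mem_iff.2 hmem1)
      simp [pvP] at hP1
      simp [hP1] at hx
    | some j2 =>
      have hP2 : pvP arr j2 = true := by
        simpa [pvP] using List.find?_some hfind
      have hj2s : j2 ∈ s := List.mem_of_find?_eq_some hfind
      have hj2 : j2 ∈ idxs := hperm.mem_iff.1 hj2s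
      have hR12 : pvR arr j1 j2 := hall1 j2 hj2 hP2
      have hfind' : s.find? (pvP arr) = some j2 := by
        simpa [pvP] using hfind
      have hR21 : pvR arr j2 j1 := pvFind_some_min arr s hsp j2 hfind' j1
        (hperm.mem_iff.2 hmem1) hP1
      have : j2 = j1 := pvR_antisymm arr hR21 hR12
      simp [hfold, this]
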